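-- pv_equiv track=rewrite | github.com/mayur75584/GeeksForGeeks | TCS Digital Practice questions/28(Lexi String).py | LexiString
-- ===== SOURCE A (Python) =====
-- def LexiString(P,S):
--     z=[]
--     for i in S:
--         z.append(P.index(i))
--     z.sort()
--     s1=''
--     for i in z:
--         s1+=P[i]
--     return s1
-- ===== SOURCE B (Python) =====
-- def LexiString(P, S):
--     # counting pass: bucket S's characters by their first-occurrence order in P
--     chars = set(P)
--     counts = {}
--     for c in S:
--         if c not in chars:
--             raise ValueError("substring not found")
--         counts[c] = counts.get(c, 0) + 1
--     out = []
--     seen = set()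
--     for c in P:
--         if c not in seen:
--             seen.add(c)
--             out.append(c * counts.get(c, 0))
--     return ''.join(out)
-- ===== Notes on version B (the rewrite author's own statement) =====
-- stated objective: alternative
-- what changed: Replaces the per-character linear P.index scan plus comparison sort by a single counting pass: a frequency dict of S (validated against set(P)), then one left-to-right sweep of P emitting each first-seen character repeated by its count.
import Mathlib
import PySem

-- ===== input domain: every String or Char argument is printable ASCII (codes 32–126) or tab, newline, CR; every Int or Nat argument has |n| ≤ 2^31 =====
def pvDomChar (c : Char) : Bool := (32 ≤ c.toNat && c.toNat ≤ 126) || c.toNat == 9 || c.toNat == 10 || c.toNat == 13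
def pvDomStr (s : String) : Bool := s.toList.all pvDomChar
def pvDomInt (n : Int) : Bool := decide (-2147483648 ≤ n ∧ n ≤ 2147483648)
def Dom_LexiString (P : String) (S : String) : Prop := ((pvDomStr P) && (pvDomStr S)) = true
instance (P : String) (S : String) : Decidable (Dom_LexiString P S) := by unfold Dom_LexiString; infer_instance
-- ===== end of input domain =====

-- B replaces A's per-character P.index scan + comparison sort by one counting pass over S and one seen-set sweep of P.
-- ===== PORT A =====
def LexiString (P : String) (S : String) : String :=
  String.ofList
    ((PySem.List.sorted
        (S.toList.foldl (fun z c => z ++ [PySem.Chars.find P.toList [c]]) [])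
        (fun x => x) false).foldl
      (fun s1 i => s1 ++ (PySem.List.pyGet? P.toList i).elim [] (fun c => [c])) [])

-- ===== PORT B =====
def LexiString_alt (P : String) (S : String) : String :=
  let chars : PySem.Set Char := PySem.Set.ofList P.toList
  -- the 'else' branch is Python's `raise ValueError` (inputs excluded by Pre_): the port returns with the char skipped
  let counts : PySem.Dict Char Int :=
    S.toList.foldl (fun d c =>
      if PySem.Set.contains chars c then d.insert c (d.getD c 0 + 1) else d) PySem.Dict.empty
  String.ofList
    (P.toList.foldl
      (fun (st : PySem.Set Char × List Char) c =>
        if PySem.Set.contains st.1 c then st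
        else (PySem.Set.add st.1 c, st.2 ++ List.replicate (counts.getD c 0).toNat c))
      (PySem.Set.empty, [])).2

-- ===== PRECONDITION & SPEC =====
-- Pre_ excludes exactly the inputs where A raises ValueError: some character of S does not occur in P.
def Pre_LexiString (P : String) (S : String) : Prop := (S.toList.all (fun c => P.toList.contains c)) = true
instance (P : String) (S : String) : Decidable (Pre_LexiString P S) := by unfold Pre_LexiString; infer_instance
def pvWitness_LexiString : String × String := ("bca", "aabcc")

def Spec_LexiString (P : String) (S : String) (out : String) : Prop := out = LexiString_alt P S
instance (P : String) (S : String) (out : String) : Decidable (Spec_LexiString P S out) := by unfold Spec_LexiString; infer_instance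

-- ===== CLAIM (what is proved, stated in full; the proofs are below) =====
def Claim_equal_LexiString : Prop := ∀ (P : String) (S : String), Dom_LexiString P S → Pre_LexiString P S → Spec_LexiString P S (LexiString P S)

-- ===== LEMMAS AND PROOFS =====

-- the first-seen characters of p, in order, skipping those already in `seen` (B's seen-set sweep, abstracted)
def newFirst : PySem.Set Char → List Char → List Char
  | _, [] => []
  | seen, c :: p =>
    if PySem.Set.contains seen c then newFirst seen p else c :: newFirst (PySem.Set.add seen c) p

theorem find_single_go (c : Char) (p : List Char) (h : c ∈ p) : ∀ (k : Nat),
    PySem.Chars.find.go [c] p k = ((k + p.idxOf c : Nat) : Int) := by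
  induction p with
  | nil => cases h
  | cons a t ih =>
    intro k
    rw [PySem.Chars.find.go]
    by_cases hac : a = c
    · subst hac
      simp [List.isPrefixOf]
    · have hct : c ∈ t := by
        rcases List.mem_cons.mp h with h' | h'
        · exact absurd h'.symm hac
        · exact h'
      have hpre : List.isPrefixOf [c] (a :: t) = false := by
        simp [List.isPrefixOf]; exact fun h' => absurd h'.symm hac
      rw [hpre]
      simp only [Bool.false_eq_true, if_false]
      rw [ih hct (k+1)]
      simp [hac]
      omega

theorem find_single (p : List Char) (c : Char) (h : c ∈ p) :
    PySem.Chars.find p [c] = ((p.idxOf c : Nat) : Int) := by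
  rw [PySem.Chars.find, find_single_go c p h 0]
  simp

theorem bfold (m : Char → List Char) (p : List Char) : ∀ (seen : PySem.Set Char) (acc : List Char),
    (p.foldl (fun (st : PySem.Set Char × List Char) c =>
        if PySem.Set.contains st.1 c then st
        else (PySem.Set.add st.1 c, st.2 ++ m c)) (seen, acc)).2
      = acc ++ (newFirst seen p).flatMap m := by
  induction p with
  | nil => intro seen acc; simp [newFirst]
  | cons c t ih =>
    intro seen acc
    by_cases h : PySem.Set.contains seen c
    · simp only [newFirst, List.foldl_cons, h, if_true]
      exact ih seen acc
    · rw [Bool.not_eq_true] at h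
      simp only [newFirst, List.foldl_cons, h, Bool.false_eq_true, if_false]
      rw [ih]
      simp

theorem mem_newFirst (p : List Char) : ∀ (seen : PySem.Set Char) (x : Char),
    x ∈ newFirst seen p ↔ x ∈ p ∧ x ∉ seen := by
  induction p with
  | nil => intro seen x; simp [newFirst]
  | cons c t ih =>
    intro seen x
    simp only [newFirst, PySem.Set.contains, List.contains_iff_mem]
    by_cases h : c ∈ seen
    · simp only [h, decide_true, if_true, ih, List.mem_cons]
      constructor
      · rintro ⟨hx, hs⟩; exact ⟨Or.inr hx, hs⟩
      · rintro ⟨hx | hx, hs⟩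
        · subst hx; exact absurd h hs
        · exact ⟨hx, hs⟩
    · simp only [h, decide_false, Bool.false_eq_true, if_false, List.mem_cons, ih,
        PySem.Set.mem_add]
      by_cases hxc : x = c
      · subst hxc; tauto
      · tauto

theorem nodup_newFirst (p : List Char) : ∀ (seen : PySem.Set Char), (newFirst seen p).Nodup := by
  induction p with
  | nil => intro seen; simp [newFirst]
  | cons c t ih =>
    intro seen
    by_cases h : PySem.Set.contains seen c
    · simp only [newFirst, h, if_true]; exact ih seen
    · rw [Bool.not_eq_true] at h
      simp only [newFirst, h, Bool.false_eq_true, if_false]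
      refine List.nodup_cons.mpr ⟨?_, ih _⟩
      intro hc
      exact ((mem_newFirst t _ c).mp hc).2 ((PySem.Set.mem_add seen c c).mpr (Or.inr rfl))

theorem pairwise_newFirst (p : List Char) : ∀ (seen : PySem.Set Char),
    (newFirst seen p).Pairwise (fun a b => p.idxOf a < p.idxOf b) := by
  induction p with
  | nil => intro seen; simp [newFirst]
  | cons c t ih =>
    intro seen
    have lift : ∀ (s' : PySem.Set Char), ((newFirst s' t).Pairwise (fun a b => t.idxOf a < t.idxOf b)) →
        (∀ x ∈ newFirst s' t, x ≠ c) →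
        ((newFirst s' t).Pairwise (fun a b => (c :: t).idxOf a < (c :: t).idxOf b)) := by
      intro s' hp hne
      refine List.Pairwise.imp_of_mem ?_ hp
      intro a b ha hb hab
      rw [List.idxOf_cons, List.idxOf_cons]
      have h1 : (c == a) = false := by simp [(hne a ha).symm]
      have h2 : (c == b) = false := by simp [(hne b hb).symm]
      simp [h1, h2]
      omega
    by_cases h : PySem.Set.contains seen c
    · simp only [newFirst, h, if_true]
      have hc : c ∈ seen := by simpa [PySem.Set.contains] using h
      exact lift seen (ih seen) (fun x hx he =>
        ((mem_newFirst t seen x).mp hx).2 (he ▸ hc))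
    · rw [Bool.not_eq_true] at h
      simp only [newFirst, h, Bool.false_eq_true, if_false]
      have hne : ∀ x ∈ newFirst (PySem.Set.add seen c) t, x ≠ c := by
        intro x hx he
        exact ((mem_newFirst t _ x).mp hx).2 ((PySem.Set.mem_add seen c x).mpr (Or.inr he))
      refine List.pairwise_cons.mpr ⟨?_, lift _ (ih _) hne⟩
      intro b hb
      rw [List.idxOf_cons, List.idxOf_cons]
      have h2 : (c == b) = false := by simp [(hne b hb).symm]
      simp [h2]

theorem count_flatMap_replicate (l : List Char) (hl : l.Nodup) (n : Char → Nat) (d : Char) :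
    ((l.flatMap fun c => List.replicate (n c) c).count d) = if d ∈ l then n d else 0 := by
  induction l with
  | nil => simp
  | cons c t ih =>
    rw [List.nodup_cons] at hl
    simp only [List.flatMap_cons, List.count_append, ih hl.2, List.count_replicate, List.mem_cons]
    by_cases hdc : d = c
    · subst hdc
      simp [hl.1]
    · have hcd : (c == d) = false := by simp [Ne.symm hdc]
      simp [hcd, hdc]

theorem pairwise_flat (l : List Char) (f : Char → Int) (n : Char → Nat)
    (hp : l.Pairwise (fun a b => f a < f b)) :
    (l.flatMap fun c => List.replicate (n c) (f c)).Pairwise (· ≤ ·) := by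
  induction l with
  | nil => simp
  | cons c t ih =>
    rw [List.pairwise_cons] at hp
    simp only [List.flatMap_cons]
    rw [List.pairwise_append]
    refine ⟨List.pairwise_replicate.mpr (Or.inr le_rfl), ih hp.2, ?_⟩
    intro a ha b hb
    rw [List.eq_of_mem_replicate ha]
    rcases List.mem_flatMap.mp hb with ⟨c', hc', hb'⟩
    rw [List.eq_of_mem_replicate hb']
    exact le_of_lt (hp.1 c' hc')

theorem flat_get (p : List Char) (n : Char → Nat) (l : List Char) (hmem : ∀ c ∈ l, c ∈ p) :
    ((l.flatMap fun c => List.replicate (n c) ((p.idxOf c : Nat) : Int)).flatMap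
        (fun i => (PySem.List.pyGet? p i).elim [] (fun c => [c])))
      = l.flatMap (fun c => List.replicate (n c) c) := by
  induction l with
  | nil => simp
  | cons c t ih =>
    simp only [List.flatMap_cons, List.flatMap_append]
    rw [ih (fun x hx => hmem x (List.mem_cons_of_mem c hx))]
    have hget : PySem.List.pyGet? p ((p.idxOf c : Nat) : Int) = some c := by
      rw [PySem.List.pyGet?_natCast,
        List.getElem?_eq_getElem (List.idxOf_lt_length_of_mem (hmem c List.mem_cons_self))]
      simp [List.getElem_idxOf]
    rw [List.flatMap_replicate, hget]
    simp [List.flatten_replicate_singleton]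

-- ===== VERDICT (by name: the statement is the Claim_ definition above) =====
theorem LexiString_spec : Claim_equal_LexiString := by
  intro P S _ hpre0
  have hpre : ∀ c ∈ S.toList, c ∈ P.toList := by
    simpa [Pre_LexiString, List.all_eq_true] using hpre0
  unfold Spec_LexiString LexiString LexiString_alt
  simp only []
  set p := P.toList with hp
  set s := S.toList with hs
  -- B side
  rw [bfold]
  have hcfold : s.foldl (fun (d : PySem.Dict Char Int) c =>
        if PySem.Set.contains (PySem.Set.ofList p) c then d.insert c (d.getD c 0 + 1) else d)
        PySem.Dict.empty
      = s.foldl (fun (d : PySem.Dict Char Int) c => d.insert c (d.getD c 0 + 1))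
        PySem.Dict.empty := by
    apply PySem.List.foldl_congr_mem
    intro acc x hx
    have hcx : PySem.Set.contains (PySem.Set.ofList p) x = true := by
      simp only [PySem.Set.contains, List.contains_iff_mem, decide_eq_true_eq]
      exact (PySem.Set.mem_ofList p x).mpr (hpre x hx)
    rw [hcx, if_pos rfl]
  rw [hcfold]
  have hcounts : (fun c => List.replicate
        (((s.foldl (fun (d : PySem.Dict Char Int) c => d.insert c (d.getD c 0 + 1))
            PySem.Dict.empty).getD c 0).toNat) c)
      = fun c => List.replicate (s.count c) c := by
    funext c
    rw [PySem.Dict.getD_foldl_insert_add_one]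
    simp [PySem.Dict.getD_empty]
  -- A side: the list of indices is s mapped through first-index-in-p
  rw [PySem.List.foldl_append_singleton_eq_map, List.nil_append]
  have hmapf : s.map (fun c => PySem.Chars.find p [c])
      = s.map (fun c => ((p.idxOf c : Nat) : Int)) := by
    exact List.map_eq_map_iff.mpr (fun c hc => find_single p c (hpre c hc))
  rw [hmapf]
  -- the sorted index list, named
  have hnodup := nodup_newFirst p ([] : PySem.Set Char)
  have hmemNF : ∀ x, x ∈ newFirst ([] : PySem.Set Char) p ↔ x ∈ p := by
    intro x
    rw [mem_newFirst]
    simp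
  have hperm : s.Perm ((newFirst ([] : PySem.Set Char) p).flatMap fun c => List.replicate (s.count c) c) := by
    rw [List.perm_iff_count]
    intro d
    rw [count_flatMap_replicate _ hnodup]
    by_cases hd : d ∈ p
    · simp [hmemNF, hd]
    · have : d ∉ s := fun hds => hd (hpre d hds)
      simp [hmemNF, hd, List.count_eq_zero.mpr this]
  have hsorted : PySem.List.sorted (s.map (fun c => ((p.idxOf c : Nat) : Int))) (fun x => x) false
      = (newFirst ([] : PySem.Set Char) p).flatMap
          (fun c => List.replicate (s.count c) ((p.idxOf c : Nat) : Int)) := by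
    apply PySem.List.sorted_id_eq_of_perm_of_pairwise
    · have := hperm.map (fun c => ((p.idxOf c : Nat) : Int))
      rw [List.map_flatMap] at this
      simp only [List.map_replicate] at this
      exact this.symm
    · exact pairwise_flat _ _ _
        ((pairwise_newFirst p ([] : PySem.Set Char)).imp (fun h => by exact_mod_cast h))
  rw [hsorted, PySem.List.foldl_append_eq_flatMap, List.nil_append]
  rw [flat_get p (fun c => s.count c) _ (fun c hc => (hmemNF c).mp hc)]
  rw [hcounts]
  simp [PySem.Set.empty]
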